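-- pv_equiv track=rewrite | github.com/NoOnesSoul/postagalamb | nevsor.py | hetesek
-- ===== SOURCE A (Python) =====
-- def hetesek(het, nevsor):
--     while het > 28:
--         het -= 28
--     b = het * 2
--     c = b + 1
--     while b > 28:
--         b -= 28
--         c -= 28
--     if c > 28:
--         c -= 28
--     return f"**{nevsor[b]}** és **{nevsor[c]}** a hetesek."
-- ===== SOURCE B (Python) =====
-- def hetesek(het, nevsor):
--     h = het if het <= 28 else (het - 1) % 28 + 1
--     b = 2 * h
--     if b > 28:
--         b -= 28
--     c = 1 if b == 28 else b + 1
--     return f"**{nevsor[b]}** és **{nevsor[c]}** a hetesek."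
-- ===== Notes on version B (the rewrite author's own statement) =====
-- stated objective: simpler
-- what changed: Replaces both subtract-28 while-loops with closed-form modular arithmetic ((het-1)%28+1 and one conditional subtraction), computing the two indices directly.
import Mathlib
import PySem

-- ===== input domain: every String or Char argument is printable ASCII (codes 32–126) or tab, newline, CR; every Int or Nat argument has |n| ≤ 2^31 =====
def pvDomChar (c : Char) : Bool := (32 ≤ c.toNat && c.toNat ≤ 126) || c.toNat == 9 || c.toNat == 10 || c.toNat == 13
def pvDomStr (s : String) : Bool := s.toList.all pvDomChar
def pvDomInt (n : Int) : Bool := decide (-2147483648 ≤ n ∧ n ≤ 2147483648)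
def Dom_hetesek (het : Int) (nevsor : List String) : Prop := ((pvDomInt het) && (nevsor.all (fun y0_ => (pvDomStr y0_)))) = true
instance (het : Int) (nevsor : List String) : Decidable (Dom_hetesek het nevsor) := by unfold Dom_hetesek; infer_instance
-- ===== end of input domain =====

-- B replaces A's two subtract-28 loops by closed-form modular arithmetic (simpler, loop-free index computation).

-- ===== PORT A =====
-- `while het > 28: het -= 28`
def hetesekRed (het : Int) : Int :=
  if het > 28 then hetesekRed (het - 28) else het
termination_by het.toNat
decreasing_by omega

-- `while b > 28: b -= 28; c -= 28`
def hetesekLoopBC (b c : Int) : Int × Int :=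
  if b > 28 then hetesekLoopBC (b - 28) (c - 28) else (b, c)
termination_by b.toNat
decreasing_by omega

def hetesek (het : Int) (nevsor : List String) : String :=
  let het' := hetesekRed het
  let b := het' * 2
  let c := b + 1
  let bc := hetesekLoopBC b c
  let c' := if bc.2 > 28 then bc.2 - 28 else bc.2
  -- nevsor[b] / nevsor[c]: Python indexing; IndexError excluded by Pre_
  "**" ++ (PySem.List.pyGet? nevsor bc.1).getD "" ++ "** és **" ++
    (PySem.List.pyGet? nevsor c').getD "" ++ "** a hetesek."

-- ===== PORT B =====
def hetesek_alt (het : Int) (nevsor : List String) : String :=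
  let h := if het ≤ 28 then het else PySem.Int.mod (het - 1) 28 + 1
  let b := if 2 * h > 28 then 2 * h - 28 else 2 * h
  let c := if b = 28 then 1 else b + 1
  "**" ++ (PySem.List.pyGet? nevsor b).getD "" ++ "** és **" ++
    (PySem.List.pyGet? nevsor c).getD "" ++ "** a hetesek."

-- ===== PRECONDITION & SPEC =====
-- Pre_ excludes exactly the inputs on which Python A raises IndexError: both
-- final indices must be valid Python indices into nevsor.
def Pre_hetesek (het : Int) (nevsor : List String) : Prop :=
  let h := if het ≤ 28 then het else (het - 1) % 28 + 1
  let b := if 2 * h > 28 then 2 * h - 28 else 2 * h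
  let c := if b = 28 then 1 else b + 1
  (-(nevsor.length : Int) ≤ b ∧ b < nevsor.length) ∧
  (-(nevsor.length : Int) ≤ c ∧ c < nevsor.length)
instance (het : Int) (nevsor : List String) : Decidable (Pre_hetesek het nevsor) := by
  unfold Pre_hetesek; infer_instance

def pvWitness_hetesek : Int × List String := (1, ["Anna", "Bela", "Cili", "Dani"])

def Spec_hetesek (het : Int) (nevsor : List String) (out : String) : Prop := out = hetesek_alt het nevsor
instance (het : Int) (nevsor : List String) (out : String) : Decidable (Spec_hetesek het nevsor out) := by unfold Spec_hetesek; infer_instance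

-- ===== CLAIM (what is proved, stated in full; the proofs are below) =====
def Claim_equal_hetesek : Prop := ∀ (het : Int) (nevsor : List String), Dom_hetesek het nevsor → Pre_hetesek het nevsor → Spec_hetesek het nevsor (hetesek het nevsor)

-- ===== LEMMAS AND PROOFS =====

theorem hetesekRed_eq (het : Int) :
    hetesekRed het = if het ≤ 28 then het else (het - 1) % 28 + 1 := by
  fun_induction hetesekRed het with
  | case1 het h ih =>
    rw [ih]
    split <;> split <;> omega
  | case2 het h =>
    split <;> omega

theorem hetesekLoopBC_eq (b c : Int) (hb : b ≤ 56) :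
    hetesekLoopBC b c = (if b > 28 then b - 28 else b, if b > 28 then c - 28 else c) := by
  rw [hetesekLoopBC]
  split
  · rw [hetesekLoopBC]
    split <;> simp_all <;> omega
  · simp_all

theorem hetesek_eq_alt (het : Int) (nevsor : List String) :
    hetesek het nevsor = hetesek_alt het nevsor := by
  unfold hetesek hetesek_alt
  dsimp only
  rw [hetesekRed_eq]
  rw [PySem.Int.mod_eq_emod_of_pos (by omega)]
  set h : Int := if het ≤ 28 then het else (het - 1) % 28 + 1 with hh
  have hle : h ≤ 28 := by
    rw [hh]; split
    · omega
    · have := Int.emod_lt_of_pos (het - 1) (b := 28) (by omega); omega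
  rw [hetesekLoopBC_eq _ _ (by omega)]
  have hb : (if 2 * h > 28 then 2 * h - 28 else 2 * h) = h * 2 - (if h * 2 > 28 then 28 else 0) := by
    split <;> split <;> omega
  have hc : (if (if h * 2 > 28 then h * 2 + 1 - 28 else h * 2 + 1) > 28
        then (if h * 2 > 28 then h * 2 + 1 - 28 else h * 2 + 1) - 28
        else (if h * 2 > 28 then h * 2 + 1 - 28 else h * 2 + 1))
      = (if (if 2 * h > 28 then 2 * h - 28 else 2 * h) = 28 then 1
         else (if 2 * h > 28 then 2 * h - 28 else 2 * h) + 1) := by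
    split <;> split <;> split <;> split <;> omega
  simp only [hb, hc]
  split <;> simp

-- ===== VERDICT (by name: the statement is the Claim_ definition above) =====
theorem hetesek_spec : Claim_equal_hetesek := by
  intro het nevsor _ _
  unfold Spec_hetesek
  exact hetesek_eq_alt het nevsor
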